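-- pv_equiv track=rewrite | github.com/binga288/MOSR | check_data_distance_2.py | between_distribution
-- ===== SOURCE A (Python) =====
-- from collections import defaultdict, Counter
--
-- def between_distribution(lines, time = 23708115):
--     def def_set():
--         return [set(),set()]
--     from_users = defaultdict(def_set)
--     to_users = defaultdict(def_set)
--     for line in lines:
--         string = line.replace("\n","").split(" ")
--         cur_time = int(string[2])
--         if cur_time < time + 1:
--             from_users[string[0]][0].add(string[1])
--             to_users[string[1]][0].add(string[0])
--         else:
--             if string[1] not in from_users[string[0]][0]:
--                 from_users[string[0]][1].add(string[1])
--             if string[0] not in to_users[string[1]][0]: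
--                 to_users[string[1]][1].add(string[0])
--     from_num, to_num = 0,0
--     for key in from_users.keys():
--         if len(from_users[key][1]) !=0:
--             from_num +=1
--     for key in to_users.keys():
--         if len(to_users[key][1]) !=0:
--             to_num +=1
--     return from_num, to_num
-- ===== SOURCE B (Python) =====
-- def between_distribution(lines, time = 23708115):
--     # Staged design: parse once; index the FIRST before-threshold occurrence of
--     # each (from, to) pair by line number; an after-threshold line at index i
--     # qualifies iff its pair first occurs before-threshold only at index > i
--     # (or never); the answers are the distinct sources / targets of qualifying
--     # lines.
--     parsed = [(s[0], s[1], int(s[2])) for s in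
--               (line.replace("\n", "").split(" ") for line in lines)]
--     first_before = {}
--     for i, (u, v, t) in enumerate(parsed):
--         if t <= time and (u, v) not in first_before:
--             first_before[(u, v)] = i
--     n = len(parsed)
--     qualifying = [(u, v) for i, (u, v, t) in enumerate(parsed)
--                   if t > time and i < first_before.get((u, v), n)]
--     return len({u for u, _ in qualifying}), len({v for _, v in qualifying})
-- ===== Notes on version B (the rewrite author's own statement) =====
-- stated objective: alternative
-- what changed: B replaces A's incremental defaultdict of [before-set, after-set] pairs plus trailing key-counting loops with a staged design: parse once, index the first before-threshold occurrence of each (from,to) pair by line number, select qualifying after-threshold lines by comparing indices, and return the distinct-source/distinct-target counts of that selection.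
import Mathlib
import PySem

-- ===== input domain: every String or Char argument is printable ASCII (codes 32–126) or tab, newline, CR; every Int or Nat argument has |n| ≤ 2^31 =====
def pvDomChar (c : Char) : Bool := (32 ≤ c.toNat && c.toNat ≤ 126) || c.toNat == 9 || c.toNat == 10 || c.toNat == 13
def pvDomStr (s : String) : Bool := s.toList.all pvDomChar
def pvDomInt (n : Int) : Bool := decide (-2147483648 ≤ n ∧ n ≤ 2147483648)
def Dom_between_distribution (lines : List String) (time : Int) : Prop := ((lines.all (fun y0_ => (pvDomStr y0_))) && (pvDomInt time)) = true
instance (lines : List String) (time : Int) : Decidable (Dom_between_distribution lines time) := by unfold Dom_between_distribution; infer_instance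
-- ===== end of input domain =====

-- B replaces A's incremental defaultdict of [before-set, after-set] pairs plus
-- trailing key-counting loops by a staged design: parse once, index the first
-- before-threshold occurrence of each (from,to) pair by line number, select
-- qualifying after-threshold lines by index comparison, and count the distinct
-- sources/targets of the selection (objective: alternative).

-- shared line parsing: line.replace("\n","").split(" ")
def pvTokens (line : String) : List String :=
  (PySem.Str.split? (PySem.Str.replace line "\n" "") " ").getD []

-- ===== PORT A =====
-- one iteration of A's main loop; outside Pre_ (short line / non-int field)
-- Python raises, the port substitutes defaults ("" / 0) there.
def pvStepA (time : Int)
    (st : PySem.Dict String (PySem.Set String × PySem.Set String) ×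
          PySem.Dict String (PySem.Set String × PySem.Set String))
    (line : String) :
    PySem.Dict String (PySem.Set String × PySem.Set String) ×
    PySem.Dict String (PySem.Set String × PySem.Set String) :=
  let s := pvTokens line
  let u := s.getD 0 ""
  let v := s.getD 1 ""
  let t := (PySem.Int.ofStr? (s.getD 2 "")).getD 0
  let fu := st.1
  let tu := st.2
  if t < time + 1 then
    let e := fu.getD u ([], [])
    let e' := tu.getD v ([], [])
    (fu.insert u (PySem.Set.add e.1 v, e.2), tu.insert v (PySem.Set.add e'.1 u, e'.2))
  else
    -- defaultdict access creates the entry even when nothing is added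
    let fu1 := fu.setdefault u ([], [])
    let tu1 := tu.setdefault v ([], [])
    let fu2 := if PySem.Set.contains (fu1.getD u ([], [])).1 v then fu1
               else fu1.insert u ((fu1.getD u ([], [])).1,
                                  PySem.Set.add (fu1.getD u ([], [])).2 v)
    let tu2 := if PySem.Set.contains (tu1.getD v ([], [])).1 u then tu1
               else tu1.insert v ((tu1.getD v ([], [])).1,
                                  PySem.Set.add (tu1.getD v ([], [])).2 u)
    (fu2, tu2)

def between_distribution (lines : List String) (time : Int) : Int × Int :=
  let st := lines.foldl (pvStepA time) (PySem.Dict.empty, PySem.Dict.empty)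
  let fu := st.1
  let tu := st.2
  let from_num := fu.keys.foldl
    (fun n k => if (fu.getD k ([], [])).2.length ≠ 0 then n + 1 else n) (0 : Int)
  let to_num := tu.keys.foldl
    (fun n k => if (tu.getD k ([], [])).2.length ≠ 0 then n + 1 else n) (0 : Int)
  (from_num, to_num)

-- ===== PORT B =====
-- B's parsed line (u, v, t); same default substitution outside Pre_.
def pvParse (line : String) : String × String × Int :=
  let s := pvTokens line
  (s.getD 0 "", s.getD 1 "", (PySem.Int.ofStr? (s.getD 2 "")).getD 0)

-- B's first pass: first_before[(u,v)] = first index of a before-threshold (u,v) line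
def pvFirstBefore (time : Int) (parsed : List (String × String × Int)) :
    PySem.Dict (String × String) Int :=
  (PySem.List.enumerate parsed).foldl
    (fun d p => if p.2.2.2 ≤ time ∧ d.contains (p.2.1, p.2.2.1) = false
                then d.insert (p.2.1, p.2.2.1) p.1 else d)
    PySem.Dict.empty

-- B's second pass: the comprehension selecting qualifying after-threshold lines
def pvQualifying (time : Int) (parsed : List (String × String × Int))
    (first_before : PySem.Dict (String × String) Int) (n : Int) :
    List (String × String) :=
  ((PySem.List.enumerate parsed).filter
      (fun p => decide (time < p.2.2.2 ∧ p.1 < first_before.getD (p.2.1, p.2.2.1) n))).map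
    (fun p => (p.2.1, p.2.2.1))

def between_distribution_alt (lines : List String) (time : Int) : Int × Int :=
  let parsed := lines.map pvParse
  let first_before := pvFirstBefore time parsed
  let n : Int := parsed.length
  let qualifying := pvQualifying time parsed first_before n
  (((PySem.Set.ofList (qualifying.map Prod.fst)).length : Int),
   ((PySem.Set.ofList (qualifying.map (fun q => q.2))).length : Int))

-- ===== PRECONDITION & SPEC =====
-- Pre_ excludes exactly the lines on which Python A raises: fewer than three
-- space-separated fields (IndexError) or a third field int() rejects (ValueError).
def Pre_between_distribution (lines : List String) (_time : Int) : Prop :=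
  ∀ line ∈ lines, 3 ≤ (pvTokens line).length ∧
    (PySem.Int.ofStr? ((pvTokens line).getD 2 "")).isSome = true
instance (lines : List String) (time : Int) : Decidable (Pre_between_distribution lines time) := by
  unfold Pre_between_distribution; infer_instance
def pvWitness_between_distribution : List String × Int := (["a b 1", "a b 5", "c a 9"], 2)
def Spec_between_distribution (lines : List String) (time : Int) (out : Int × Int) : Prop := out = between_distribution_alt lines time
instance (lines : List String) (time : Int) (out : Int × Int) : Decidable (Spec_between_distribution lines time out) := by unfold Spec_between_distribution; infer_instance

-- ===== CLAIM (what is proved, stated in full; the proofs are below) =====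
def Claim_equal_between_distribution : Prop := ∀ (lines : List String) (time : Int), Dom_between_distribution lines time → Pre_between_distribution lines time → Spec_between_distribution lines time (between_distribution lines time)

-- ===== LEMMAS AND PROOFS =====

-- positional predicates over the parsed list
-- BAt: line j is before-threshold with endpoint pair pr
def BAt (time : Int) (ps : List (String × String × Int)) (j : Nat)
    (pr : String × String) : Prop :=
  ∃ e, ps[j]? = some e ∧ e.2.2 ≤ time ∧ (e.1, e.2.1) = pr

-- QAt: line i is after-threshold with key (source resp. target) k and its pair
-- never occurs before-threshold earlier
def QAt (keyOf : String × String × Int → String) (time : Int)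
    (ps : List (String × String × Int)) (i : Nat) (k : String) : Prop :=
  ∃ e, ps[i]? = some e ∧ keyOf e = k ∧ time < e.2.2 ∧
    ∀ j, j < i → ¬ BAt time ps j (e.1, e.2.1)

lemma bAt_lt_length {time : Int} {ps : List (String × String × Int)} {j : Nat}
    {pr : String × String} (h : BAt time ps j pr) : j < ps.length := by
  obtain ⟨e, he, -⟩ := h
  obtain ⟨hlt, -⟩ := List.getElem?_eq_some_iff.1 he
  exact hlt

lemma bAt_append (time : Int) (ps : List (String × String × Int))
    (e : String × String × Int) (j : Nat) (pr : String × String) :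
    BAt time (ps ++ [e]) j pr ↔
      (BAt time ps j pr ∨ (j = ps.length ∧ e.2.2 ≤ time ∧ (e.1, e.2.1) = pr)) := by
  unfold BAt
  rcases lt_trichotomy j ps.length with hj | hj | hj
  · rw [List.getElem?_append_left hj]
    have hne : j ≠ ps.length := Nat.ne_of_lt hj
    simp [hne]
  · subst hj
    rw [List.getElem?_append_right (le_refl _)]
    simp only [Nat.sub_self, List.getElem?_cons_zero]
    simp
  · rw [List.getElem?_append_right (le_of_lt hj)]
    have h1 : ([e] : List _)[j - ps.length]? = none := by
      apply List.getElem?_eq_none; simp; omega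
    have h2 : ps[j]? = none := by apply List.getElem?_eq_none; omega
    have hne : j ≠ ps.length := by omega
    simp [h1, h2, hne]

lemma exists_bAt_append (time : Int) (ps : List (String × String × Int))
    (e : String × String × Int) (pr : String × String) :
    (∃ j, BAt time (ps ++ [e]) j pr) ↔
      ((∃ j, BAt time ps j pr) ∨ (e.2.2 ≤ time ∧ (e.1, e.2.1) = pr)) := by
  constructor
  · rintro ⟨j, hj⟩
    rcases (bAt_append time ps e j pr).1 hj with h | ⟨-, h⟩
    · exact Or.inl ⟨j, h⟩
    · exact Or.inr h
  · rintro (⟨j, hj⟩ | h)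
    · exact ⟨j, (bAt_append time ps e j pr).2 (Or.inl hj)⟩
    · exact ⟨ps.length, (bAt_append time ps e ps.length pr).2 (Or.inr ⟨rfl, h⟩)⟩

lemma exists_qAt_append (keyOf : String × String × Int → String) (time : Int)
    (ps : List (String × String × Int)) (e : String × String × Int) (k : String) :
    (∃ i, QAt keyOf time (ps ++ [e]) i k) ↔
      ((∃ i, QAt keyOf time ps i k) ∨
       (keyOf e = k ∧ time < e.2.2 ∧ ∀ j, ¬ BAt time ps j (e.1, e.2.1))) := by
  constructor
  · rintro ⟨i, e', he', hk, ht, hmin⟩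
    rcases lt_trichotomy i ps.length with hi | hi | hi
    · left
      refine ⟨i, e', ?_, hk, ht, ?_⟩
      · rwa [List.getElem?_append_left hi] at he'
      · intro j hj hB
        exact hmin j hj ((bAt_append time ps e j _).2 (Or.inl hB))
    · subst hi
      right
      rw [List.getElem?_append_right (le_refl _)] at he'
      simp only [Nat.sub_self, List.getElem?_cons_zero, Option.some.injEq] at he'
      rw [he']
      refine ⟨hk, ht, ?_⟩
      intro j hB
      have hjlt := bAt_lt_length hB
      exact hmin j hjlt ((bAt_append time ps e j _).2 (Or.inl hB))
    · exfalso
      rw [List.getElem?_append_right (le_of_lt hi)] at he'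
      have hnone : ([e] : List _)[i - ps.length]? = none := by
        apply List.getElem?_eq_none; simp; omega
      rw [hnone] at he'; exact absurd he' (by simp)
  · rintro (⟨i, e', he', hk, ht, hmin⟩ | ⟨hk, ht, hnone⟩)
    · have hi : i < ps.length := by
        obtain ⟨hlt, -⟩ := List.getElem?_eq_some_iff.1 he'
        exact hlt
      refine ⟨i, e', ?_, hk, ht, ?_⟩
      · rwa [List.getElem?_append_left hi]
      · intro j hj hB
        rcases (bAt_append time ps e j _).1 hB with h | ⟨hj', -⟩
        · exact hmin j hj h
        · omega
    · refine ⟨ps.length, e, ?_, hk, ht, ?_⟩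
      · rw [List.getElem?_append_right (le_refl _)]; simp
      · intro j hj hB
        rcases (bAt_append time ps e j _).1 hB with h | ⟨hj', -⟩
        · exact hnone j h
        · omega

-- small Set facts (on top of the PySem primitives)
lemma set_contains_iff (s : PySem.Set String) (x : String) :
    PySem.Set.contains s x = true ↔ x ∈ s := by
  simp [PySem.Set.contains]

lemma set_add_of_mem (s : PySem.Set String) (x : String) (h : x ∈ s) :
    PySem.Set.add s x = s := by
  simp only [PySem.Set.add]
  rw [if_pos ((set_contains_iff s x).2 h)]

lemma set_add_of_not_mem (s : PySem.Set String) (x : String) (h : x ∉ s) :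
    PySem.Set.add s x = s ++ [x] := by
  simp only [PySem.Set.add]
  rw [if_neg (fun hc => h ((set_contains_iff s x).1 hc))]

lemma mem_set_add (s : PySem.Set String) (x y : String) :
    y ∈ PySem.Set.add s x ↔ y = x ∨ y ∈ s := by
  by_cases hx : x ∈ s
  · rw [set_add_of_mem s x hx]
    constructor
    · exact Or.inr
    · rintro (rfl | h)
      · exact hx
      · exact h
  · rw [set_add_of_not_mem s x hx]
    simp [or_comm]

lemma set_add_ne_nil (s : PySem.Set String) (x : String) : PySem.Set.add s x ≠ [] := by
  by_cases hx : x ∈ s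
  · rw [set_add_of_mem s x hx]; exact List.ne_nil_of_mem hx
  · rw [set_add_of_not_mem s x hx]; simp

lemma getD_setdefault (d : PySem.Dict String (PySem.Set String × PySem.Set String))
    (k k' : String) :
    (d.setdefault k ([], [])).getD k' ([], []) = d.getD k' ([], []) := by
  by_cases hc : d.contains k = true
  · rw [PySem.Dict.setdefault_of_contains _ _ hc]
  · rw [PySem.Dict.setdefault_of_not_contains _ _ (by simpa using hc), PySem.Dict.getD_insert]
    split
    · next he => rw [he, PySem.Dict.getD_of_not_contains _ _ (by simpa using hc)]
    · rfl

lemma nodup_keys_setdefault (d : PySem.Dict String (PySem.Set String × PySem.Set String))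
    (k : String) (h : d.keys.Nodup) : (d.setdefault k ([], [])).keys.Nodup := by
  by_cases hc : d.contains k = true
  · rwa [PySem.Dict.setdefault_of_contains _ _ hc]
  · rw [PySem.Dict.setdefault_of_not_contains _ _ (by simpa using hc)]
    exact PySem.Dict.nodup_keys_insert _ _ _ h

-- one generic side of A's loop body (from_users with pr k x = (k,x); to_users
-- with pr k x = (x,k))
def sideStep (time : Int) (k0 x0 : String) (t : Int)
    (d : PySem.Dict String (PySem.Set String × PySem.Set String)) :
    PySem.Dict String (PySem.Set String × PySem.Set String) :=
  if t < time + 1 then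
    d.insert k0 (PySem.Set.add (d.getD k0 ([], [])).1 x0, (d.getD k0 ([], [])).2)
  else
    let d1 := d.setdefault k0 ([], [])
    if PySem.Set.contains (d1.getD k0 ([], [])).1 x0 then d1
    else d1.insert k0 ((d1.getD k0 ([], [])).1, PySem.Set.add (d1.getD k0 ([], [])).2 x0)

def pvAbsStep (time : Int)
    (st : PySem.Dict String (PySem.Set String × PySem.Set String) ×
          PySem.Dict String (PySem.Set String × PySem.Set String))
    (e : String × String × Int) :
    PySem.Dict String (PySem.Set String × PySem.Set String) ×
    PySem.Dict String (PySem.Set String × PySem.Set String) :=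
  (sideStep time e.1 e.2.1 e.2.2 st.1, sideStep time e.2.1 e.1 e.2.2 st.2)

def pvStepE (time : Int)
    (st : PySem.Dict String (PySem.Set String × PySem.Set String) ×
          PySem.Dict String (PySem.Set String × PySem.Set String))
    (e0 : String × String × Int) :
    PySem.Dict String (PySem.Set String × PySem.Set String) ×
    PySem.Dict String (PySem.Set String × PySem.Set String) :=
  let u := e0.1
  let v := e0.2.1
  let t := e0.2.2
  let fu := st.1
  let tu := st.2
  if t < time + 1 then
    let e := fu.getD u ([], [])
    let e' := tu.getD v ([], [])
    (fu.insert u (PySem.Set.add e.1 v, e.2), tu.insert v (PySem.Set.add e'.1 u, e'.2))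
  else
    let fu1 := fu.setdefault u ([], [])
    let tu1 := tu.setdefault v ([], [])
    let fu2 := if PySem.Set.contains (fu1.getD u ([], [])).1 v then fu1
               else fu1.insert u ((fu1.getD u ([], [])).1,
                                  PySem.Set.add (fu1.getD u ([], [])).2 v)
    let tu2 := if PySem.Set.contains (tu1.getD v ([], [])).1 u then tu1
               else tu1.insert v ((tu1.getD v ([], [])).1,
                                  PySem.Set.add (tu1.getD v ([], [])).2 u)
    (fu2, tu2)

lemma stepE_eq (time : Int)
    (st : PySem.Dict String (PySem.Set String × PySem.Set String) ×
          PySem.Dict String (PySem.Set String × PySem.Set String))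
    (e0 : String × String × Int) :
    pvStepE time st e0 = pvAbsStep time st e0 := by
  obtain ⟨fu, tu⟩ := st
  obtain ⟨u, v, t⟩ := e0
  simp only [pvStepE, pvAbsStep, sideStep]
  by_cases h : t < time + 1
  · rw [if_pos h, if_pos h, if_pos h]
  · rw [if_neg h, if_neg h, if_neg h]

lemma stepA_eq (time : Int)
    (st : PySem.Dict String (PySem.Set String × PySem.Set String) ×
          PySem.Dict String (PySem.Set String × PySem.Set String)) (line : String) :
    pvStepA time st line = pvAbsStep time st (pvParse line) := by
  obtain ⟨fu, tu⟩ := st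
  rw [← stepE_eq time (fu, tu) (pvParse line)]
  unfold pvStepA pvStepE pvParse
  generalize pvTokens line = s
  rfl

def SInv (pr : String → String → String × String)
    (keyOf : String × String × Int → String) (time : Int)
    (ps : List (String × String × Int))
    (d : PySem.Dict String (PySem.Set String × PySem.Set String)) : Prop :=
  d.keys.Nodup ∧
  (∀ k x, x ∈ (d.getD k ([], [])).1 ↔ ∃ j, BAt time ps j (pr k x)) ∧
  (∀ k, (d.getD k ([], [])).2 ≠ [] ↔ ∃ i, QAt keyOf time ps i k)

lemma sInv_step (pr : String → String → String × String)
    (keyOf : String × String × Int → String) (time : Int)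
    (ps : List (String × String × Int)) (e : String × String × Int) (x0 : String)
    (d : PySem.Dict String (PySem.Set String × PySem.Set String))
    (hpr : pr (keyOf e) x0 = (e.1, e.2.1))
    (hinj : ∀ x, pr (keyOf e) x = (e.1, e.2.1) → x = x0)
    (hkey : ∀ k x, pr k x = (e.1, e.2.1) → k = keyOf e)
    (h : SInv pr keyOf time ps d) :
    SInv pr keyOf time (ps ++ [e]) (sideStep time (keyOf e) x0 e.2.2 d) := by
  obtain ⟨h1, h2, h3⟩ := h
  unfold sideStep
  by_cases hb : e.2.2 < time + 1
  · rw [if_pos hb]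
    have hble : e.2.2 ≤ time := Int.lt_add_one_iff.mp hb
    have hnq : ¬ time < e.2.2 := by omega
    refine ⟨PySem.Dict.nodup_keys_insert _ _ _ h1, ?_, ?_⟩
    · intro k x
      rw [PySem.Dict.getD_insert, exists_bAt_append]
      split
      · next heq =>
        subst heq
        dsimp only
        rw [mem_set_add]
        constructor
        · rintro (rfl | hx)
          · exact Or.inr ⟨hble, hpr.symm⟩
          · exact Or.inl ((h2 _ _).1 hx)
        · rintro (hold | ⟨-, hpair⟩)
          · exact Or.inr ((h2 _ _).2 hold)
          · exact Or.inl (hinj x hpair.symm)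
      · next heq =>
        constructor
        · intro hx; exact Or.inl ((h2 _ _).1 hx)
        · rintro (hold | ⟨-, hpair⟩)
          · exact (h2 _ _).2 hold
          · exact absurd (hkey k x hpair.symm) heq
    · intro k
      rw [PySem.Dict.getD_insert, exists_qAt_append]
      split
      · next heq =>
        subst heq
        dsimp only
        exact ⟨fun hx => Or.inl ((h3 _).1 hx),
               fun hor => hor.elim ((h3 _).2) (fun hc => absurd hc.2.1 hnq)⟩
      · exact ⟨fun hx => Or.inl ((h3 k).1 hx),
               fun hor => hor.elim ((h3 k).2) (fun hc => absurd hc.2.1 hnq)⟩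
  · rw [if_neg hb]
    have hgt : time < e.2.2 := by omega
    have hnb : ¬ e.2.2 ≤ time := by omega
    have hgd : ∀ k, (d.setdefault (keyOf e) ([], [])).getD k ([], []) = d.getD k ([], []) :=
      getD_setdefault d (keyOf e)
    have hnd1 : (d.setdefault (keyOf e) ([], [])).keys.Nodup := nodup_keys_setdefault d _ h1
    have hmem' : ∀ pr', (∃ j, BAt time (ps ++ [e]) j pr') ↔ (∃ j, BAt time ps j pr') := by
      intro pr'
      rw [exists_bAt_append]
      simp [hnb]
    by_cases hcont : PySem.Set.contains
        ((d.setdefault (keyOf e) ([], [])).getD (keyOf e) ([], [])).1 x0 = true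
    · rw [if_pos hcont]
      have hex : ∃ j, BAt time ps j (e.1, e.2.1) := by
        rw [hgd] at hcont
        have hm := (h2 (keyOf e) x0).1 ((set_contains_iff _ _).1 hcont)
        rwa [hpr] at hm
      refine ⟨hnd1, ?_, ?_⟩
      · intro k x
        rw [hgd, hmem' _]
        exact h2 k x
      · intro k
        rw [hgd, exists_qAt_append]
        have hno : ¬ (keyOf e = k ∧ time < e.2.2 ∧ ∀ j, ¬ BAt time ps j (e.1, e.2.1)) := by
          rintro ⟨-, -, hall⟩
          obtain ⟨j, hj⟩ := hex
          exact hall j hj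
        simp only [hno, or_false]
        exact h3 k
    · rw [if_neg hcont]
      have hnex : ¬ ∃ j, BAt time ps j (e.1, e.2.1) := by
        intro hex
        apply hcont
        rw [hgd]
        refine (set_contains_iff _ _).2 ((h2 (keyOf e) x0).2 ?_)
        rwa [hpr]
      refine ⟨PySem.Dict.nodup_keys_insert _ _ _ hnd1, ?_, ?_⟩
      · intro k x
        rw [PySem.Dict.getD_insert, hmem' _]
        split
        · next heq => subst heq; dsimp only; rw [hgd]; exact h2 _ x
        · rw [hgd]; exact h2 k x
      · intro k
        rw [PySem.Dict.getD_insert, exists_qAt_append]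
        split
        · next heq =>
          subst heq
          dsimp only
          constructor
          · intro _
            exact Or.inr ⟨rfl, hgt, fun j hj => hnex ⟨j, hj⟩⟩
          · intro _; exact set_add_ne_nil _ _
        · next heq =>
          rw [hgd]
          constructor
          · intro hx; exact Or.inl ((h3 k).1 hx)
          · rintro (hold | ⟨hke, -, -⟩)
            · exact (h3 k).2 hold
            · exact absurd hke.symm heq

def prF : String → String → String × String := fun k x => (k, x)
def prT : String → String → String × String := fun k x => (x, k)
def keyF : String × String × Int → String := fun e => e.1
def keyT : String × String × Int → String := fun e => e.2.1

lemma sInv_empty (pr : String → String → String × String)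
    (keyOf : String × String × Int → String) (time : Int) :
    SInv pr keyOf time [] PySem.Dict.empty := by
  refine ⟨by rw [PySem.Dict.keys_empty]; exact List.nodup_nil, ?_, ?_⟩
  · intro k x
    rw [PySem.Dict.getD_empty]
    constructor
    · intro h; exact absurd h List.not_mem_nil
    · rintro ⟨j, e, he, -⟩; simp at he
  · intro k
    rw [PySem.Dict.getD_empty]
    constructor
    · intro h; exact absurd rfl h
    · rintro ⟨i, e, he, -⟩; simp at he

lemma absfold_inv (time : Int) (ps : List (String × String × Int)) :
    SInv prF keyF time ps
      (ps.foldl (pvAbsStep time) (PySem.Dict.empty, PySem.Dict.empty)).1 ∧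
    SInv prT keyT time ps
      (ps.foldl (pvAbsStep time) (PySem.Dict.empty, PySem.Dict.empty)).2 := by
  induction ps using List.reverseRecOn with
  | nil => exact ⟨sInv_empty _ _ _, sInv_empty _ _ _⟩
  | append_singleton ps e ih =>
    rw [List.foldl_append, List.foldl_cons, List.foldl_nil]
    obtain ⟨hf, ht⟩ := ih
    constructor
    · exact sInv_step prF keyF time ps e e.2.1 _ rfl
        (fun x hx => (Prod.mk.injEq _ _ _ _ ▸ hx).2)
        (fun k x hx => (Prod.mk.injEq _ _ _ _ ▸ hx).1) hf
    · exact sInv_step prT keyT time ps e e.1 _ rfl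
        (fun x hx => (Prod.mk.injEq _ _ _ _ ▸ hx).1)
        (fun k x hx => (Prod.mk.injEq _ _ _ _ ▸ hx).2) ht

-- A's trailing counting loop returns the size of any duplicate-free list S
-- holding exactly the keys with non-empty after-set
lemma cnt_eq (d : PySem.Dict String (PySem.Set String × PySem.Set String))
    (S : List String) (h1 : d.keys.Nodup) (hS : S.Nodup)
    (hmem : ∀ u, u ∈ S ↔ (d.getD u ([], [])).2 ≠ []) :
    d.keys.foldl (fun n k => if (d.getD k ([], [])).2.length ≠ 0 then n + 1 else n) (0 : Int)
      = (S.length : Int) := by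
  rw [PySem.List.foldl_ite_add_one, zero_add]
  have hcong : d.keys.countP (fun k => decide ((d.getD k ([], [])).2.length ≠ 0)) =
      d.keys.countP (fun k => decide (k ∈ S)) := by
    apply List.countP_congr
    intro k _
    simp only [decide_eq_true_eq]
    rw [hmem k]
    simp [ne_eq, List.length_eq_zero_iff]
  rw [hcong, List.countP_eq_length_filter]
  have hperm : (d.keys.filter (fun k => decide (k ∈ S))).Perm S := by
    refine (List.perm_ext_iff_of_nodup (h1.filter _) hS).2 ?_
    intro a
    simp only [List.mem_filter, decide_eq_true_eq]
    constructor
    · exact fun ⟨_, ha⟩ => ha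
    · intro ha
      refine ⟨?_, ha⟩
      have hne := (hmem a).1 ha
      by_cases hc : d.contains a = true
      · exact (PySem.Dict.contains_iff_mem_keys _ _).1 hc
      · rw [PySem.Dict.getD_of_not_contains _ _ (by simpa using hc)] at hne
        exact absurd rfl hne
  rw [hperm.length_eq]

-- characterisation of B's first_before dict: none = the pair never occurs
-- before-threshold; some m = m is the first such index
def FBInv (time : Int) (ps : List (String × String × Int))
    (d : PySem.Dict (String × String) Int) : Prop :=
  ∀ pr, (d.get? pr = none ∧ ∀ j, ¬ BAt time ps j pr) ∨
    (∃ m : Nat, d.get? pr = some (m : Int) ∧ BAt time ps m pr ∧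
      ∀ j, j < m → ¬ BAt time ps j pr)

lemma fb_inv (time : Int) (ps : List (String × String × Int)) :
    FBInv time ps (pvFirstBefore time ps) := by
  unfold pvFirstBefore
  induction ps using List.reverseRecOn with
  | nil =>
    intro pr
    left
    refine ⟨PySem.Dict.get?_empty _, ?_⟩
    rintro j ⟨e, he, -⟩; simp at he
  | append_singleton ps e ih =>
    rw [PySem.List.enumerate_append, List.foldl_append]
    rw [show PySem.List.enumerate [e] (0 + ps.length) = [((0 : Int) + ps.length, e)] from rfl]
    rw [List.foldl_cons, List.foldl_nil]
    set d := (PySem.List.enumerate ps 0).foldl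
      (fun d p => if p.2.2.2 ≤ time ∧ d.contains (p.2.1, p.2.2.1) = false
                  then d.insert (p.2.1, p.2.2.1) p.1 else d) PySem.Dict.empty with hd
    intro pr
    by_cases hcond : e.2.2 ≤ time ∧ d.contains (e.1, e.2.1) = false
    · rw [if_pos hcond]
      by_cases hpr : pr = (e.1, e.2.1)
      · subst hpr
        right
        refine ⟨ps.length, ?_, ?_, ?_⟩
        · rw [PySem.Dict.get?_insert, if_pos rfl]
          norm_num
        · exact ⟨e, by simp, hcond.1, rfl⟩
        · intro j hj hB
          rcases (bAt_append time ps e j _).1 hB with h | ⟨hj', -⟩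
          · rcases ih (e.1, e.2.1) with ⟨-, hall⟩ | ⟨m, hsome, -, -⟩
            · exact hall j h
            · have hc : d.contains (e.1, e.2.1) = true := by
                rw [PySem.Dict.contains_eq_isSome_get?, hsome]; rfl
              rw [hcond.2] at hc; exact Bool.noConfusion hc
          · omega
      · rw [PySem.Dict.get?_insert, if_neg hpr]
        rcases ih pr with ⟨hnone, hall⟩ | ⟨m, hsome, hB, hmin⟩
        · left
          refine ⟨hnone, ?_⟩
          intro j hB
          rcases (bAt_append time ps e j pr).1 hB with h | ⟨-, -, hp⟩
          · exact hall j h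
          · exact hpr hp.symm
        · right
          refine ⟨m, hsome, (bAt_append time ps e m pr).2 (Or.inl hB), ?_⟩
          intro j hj hBj
          rcases (bAt_append time ps e j pr).1 hBj with h | ⟨-, -, hp⟩
          · exact hmin j hj h
          · exact absurd hp.symm hpr
    · rw [if_neg hcond]
      rcases ih pr with ⟨hnone, hall⟩ | ⟨m, hsome, hB, hmin⟩
      · left
        refine ⟨hnone, ?_⟩
        intro j hB
        rcases (bAt_append time ps e j pr).1 hB with h | ⟨-, ht, hp⟩
        · exact hall j h
        · apply hcond
          refine ⟨ht, ?_⟩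
          rw [← hp] at hnone
          rw [PySem.Dict.contains_eq_isSome_get?, hnone]
          rfl
      · right
        refine ⟨m, hsome, (bAt_append time ps e m pr).2 (Or.inl hB), ?_⟩
        intro j hj hBj
        rcases (bAt_append time ps e j pr).1 hBj with h | ⟨hj', -⟩
        · exact hmin j hj h
        · have hlt := bAt_lt_length hB
          omega

-- B's qualifying test at an after-threshold line i says: no earlier
-- before-threshold occurrence of the pair
lemma fb_cond (time : Int) (ps : List (String × String × Int)) (i : Nat)
    (hi : i < ps.length) (hafter : time < (ps[i]).2.2) :
    ((i : Int) < (pvFirstBefore time ps).getD ((ps[i]).1, (ps[i]).2.1) (ps.length : Int))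
      ↔ ∀ j, j < i → ¬ BAt time ps j ((ps[i]).1, (ps[i]).2.1) := by
  rcases fb_inv time ps ((ps[i]).1, (ps[i]).2.1) with ⟨hnone, hall⟩ | ⟨m, hsome, hB, hmin⟩
  · rw [PySem.Dict.getD_eq_get?_getD, hnone]
    simp only [Option.getD_none]
    constructor
    · intro _ j _; exact hall j
    · intro _; exact_mod_cast hi
  · rw [PySem.Dict.getD_eq_get?_getD, hsome]
    simp only [Option.getD_some]
    have hmi : m ≠ i := by
      intro hmi
      subst hmi
      obtain ⟨em, hem, htm, -⟩ := hB
      rw [List.getElem?_eq_getElem hi] at hem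
      have hem' : ps[m] = em := Option.some.inj hem
      rw [hem'] at hafter
      omega
    constructor
    · intro hlt j hj hBj
      have him : i < m := by exact_mod_cast hlt
      exact hmin j (by omega) hBj
    · intro hmin'
      by_contra hge
      rw [not_lt] at hge
      have hmle : m ≤ i := by exact_mod_cast hge
      have hmlt : m < i := lt_of_le_of_ne hmle hmi
      exact hmin' m hmlt hB

-- membership in B's distinct-source / distinct-target lists is exactly the
-- positional qualification predicate
lemma mem_qual_map (time : Int) (ps : List (String × String × Int))
    (f : String × String → String) (keyOf : String × String × Int → String)
    (hf : ∀ e : String × String × Int, f (e.1, e.2.1) = keyOf e) (u : String) :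
    u ∈ (pvQualifying time ps (pvFirstBefore time ps) (ps.length : Int)).map f ↔
      ∃ i, QAt keyOf time ps i u := by
  unfold pvQualifying
  rw [List.map_map]
  constructor
  · intro hu
    obtain ⟨p, hp, hpu⟩ := List.mem_map.1 hu
    obtain ⟨hpe, hc⟩ := List.mem_filter.1 hp
    obtain ⟨k, hk, rfl⟩ := (PySem.List.mem_enumerate_iff _ _ _).1 hpe
    simp only [decide_eq_true_eq, zero_add] at hc
    obtain ⟨ht, hidx⟩ := hc
    refine ⟨k, ps[k], List.getElem?_eq_getElem hk, ?_, ht, ?_⟩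
    · rw [← hpu]; exact (hf ps[k]).symm
    · exact (fb_cond time ps k hk ht).1 hidx
  · rintro ⟨i, e, he, hkey, ht, hmin⟩
    have hi : i < ps.length := by
      obtain ⟨hlt, -⟩ := List.getElem?_eq_some_iff.1 he
      exact hlt
    have hei : ps[i] = e := by
      rw [List.getElem?_eq_getElem hi] at he
      exact Option.some.inj he
    subst hei
    refine List.mem_map.2 ⟨((0 : Int) + (i : Int), ps[i]), ?_, ?_⟩
    · refine List.mem_filter.2 ⟨?_, ?_⟩
      · exact (PySem.List.mem_enumerate_iff _ _ _).2 ⟨i, hi, rfl⟩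
      · simp only [decide_eq_true_eq, zero_add]
        exact ⟨ht, (fb_cond time ps i hi ht).2 hmin⟩
    · rw [← hkey]; exact hf ps[i]

-- ===== VERDICT (by name: the statement is the Claim_ definition above) =====
theorem between_distribution_spec : Claim_equal_between_distribution := by
  intro lines time _ _
  unfold Spec_between_distribution between_distribution between_distribution_alt
  have hstep : pvStepA time = fun st line => pvAbsStep time st (pvParse line) :=
    funext fun st => funext fun line => stepA_eq time st line
  have hfold : lines.foldl (pvStepA time) (PySem.Dict.empty, PySem.Dict.empty)
      = (lines.map pvParse).foldl (pvAbsStep time) (PySem.Dict.empty, PySem.Dict.empty) := by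
    rw [hstep, ← List.foldl_map]
  rw [hfold]
  obtain ⟨hf, ht⟩ := absfold_inv time (lines.map pvParse)
  obtain ⟨hf1, hf2, hf3⟩ := hf
  obtain ⟨ht1, ht2, ht3⟩ := ht
  refine Prod.ext ?_ ?_
  · apply cnt_eq _ _ hf1 (PySem.Set.nodup_ofList _)
    intro u
    rw [PySem.Set.mem_ofList, mem_qual_map time (lines.map pvParse) Prod.fst keyF
      (fun e => rfl) u, hf3 u]
  · apply cnt_eq _ _ ht1 (PySem.Set.nodup_ofList _)
    intro u
    rw [PySem.Set.mem_ofList, mem_qual_map time (lines.map pvParse) (fun q => q.2) keyT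
      (fun e => rfl) u, ht3 u]
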